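-- pv_equiv track=rewrite | github.com/23AIBox/RL-GenRisk | src/inputall.py | random_getGene
-- ===== SOURCE A (Python) =====
-- def random_getGene(patients,gene_name):
--     gene_dic = {}
--     for patient in list(patients.keys()):
--         genes = patients[patient]
--         for gene in genes:
--             if gene in list(gene_name):
--                 if gene not in list(gene_dic.keys()):
--                     gene_dic[gene] = [patient]
--                 else:
--                     gene_dic[gene].append(patient)
--     return gene_dic
-- ===== SOURCE B (Python) =====
-- def random_getGene(patients, gene_name):
--     # gene-major: fix the key order (first qualifying occurrence), then build each bucket
--     order = list(dict.fromkeys(g for gs in patients.values() for g in gs if g in gene_name))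
--     return {g: [p for p, gs in patients.items() for x in gs if x == g] for g in order}
-- ===== Notes on version B (the rewrite author's own statement) =====
-- stated objective: alternative
-- what changed: Replaced A's patient-major single pass that incrementally appends patients into a dict of buckets with a gene-major decomposition: first compute the key order (ordered dedup of qualifying gene occurrences), then build each gene's patient bucket by an independent scan per gene.
import Mathlib
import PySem

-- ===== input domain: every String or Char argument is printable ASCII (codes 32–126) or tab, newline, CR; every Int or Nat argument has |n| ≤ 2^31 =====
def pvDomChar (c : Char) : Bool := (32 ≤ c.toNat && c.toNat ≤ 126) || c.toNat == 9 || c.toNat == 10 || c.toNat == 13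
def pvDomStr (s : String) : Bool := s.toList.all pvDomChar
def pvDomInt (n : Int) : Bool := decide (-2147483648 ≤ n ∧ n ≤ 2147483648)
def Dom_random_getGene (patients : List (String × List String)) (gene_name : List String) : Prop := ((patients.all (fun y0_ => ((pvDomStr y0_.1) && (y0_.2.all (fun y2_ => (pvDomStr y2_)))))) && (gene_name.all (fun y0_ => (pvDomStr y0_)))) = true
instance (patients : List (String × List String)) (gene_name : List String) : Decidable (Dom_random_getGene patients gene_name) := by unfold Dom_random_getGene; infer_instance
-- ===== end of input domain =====

-- B rebuilds the grouping gene-major: it first fixes the key order (first qualifying occurrence),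
-- then builds each gene's patient bucket by one scan per gene; objective: alternative decomposition.

-- ===== PORT A =====
-- A: one patient-major pass over the dict, appending each patient to its gene's bucket as occurrences are met.
def random_getGene (patients : List (String × List String)) (gene_name : List String) : List (String × List String) :=
  ((PySem.Dict.ofList patients).items.foldl
    (fun d pr =>
      pr.2.foldl (fun d gene =>
        if gene ∈ gene_name then
          if d.contains gene then d.modify gene [] (fun l => l ++ [pr.1])
          else d.insert gene [pr.1]
        else d) d)
    (PySem.Dict.empty)).items

-- ===== PORT B =====
-- B: key order first (ordered dedup of qualifying gene occurrences), then one bucket scan per gene.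
def random_getGene_alt (patients : List (String × List String)) (gene_name : List String) : List (String × List String) :=
  let ps := (PySem.Dict.ofList patients).items
  let order := PySem.List.dedup (ps.flatMap (fun pr => pr.2.filter (fun g => decide (g ∈ gene_name))))
  order.map (fun g => (g, ps.flatMap (fun pr => (pr.2.filter (fun x => x == g)).map (fun _ => pr.1))))

-- ===== PRECONDITION & SPEC =====
def Spec_random_getGene (patients : List (String × List String)) (gene_name : List String) (out : List (String × List String)) : Prop := out = random_getGene_alt patients gene_name
instance (patients : List (String × List String)) (gene_name : List String) (out : List (String × List String)) : Decidable (Spec_random_getGene patients gene_name out) := by unfold Spec_random_getGene; infer_instance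

-- ===== CLAIM (what is proved, stated in full; the proofs are below) =====
def Claim_equal_random_getGene : Prop := ∀ (patients : List (String × List String)) (gene_name : List String), Dom_random_getGene patients gene_name → Spec_random_getGene patients gene_name (random_getGene patients gene_name)

-- ===== LEMMAS AND PROOFS =====

-- the per-occurrence stream of (gene, patient) pairs A effectively folds over
def pvOcc (ps : List (String × List String)) (gene_name : List String) : List (String × String) :=
  ps.flatMap (fun pr => (pr.2.filter (fun g => decide (g ∈ gene_name))).map (fun g => (g, pr.1)))

-- A's branched update step is exactly 'modify with append' (insert of a fresh key appends to the default [])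
lemma step_eq_modify (d : PySem.Dict String (List String)) (g p : String) :
    (if d.contains g then d.modify g [] (fun l => l ++ [p]) else d.insert g [p])
      = d.modify g [] (fun l => l ++ [p]) := by
  by_cases h : d.contains g = true
  · simp [h]
  · have h' : d.contains g = false := by simpa using h
    rw [if_neg (by simp [h']), PySem.Dict.modify,
      PySem.Dict.getD_of_not_contains d [] h']
    simp

-- A's double loop is the single fold of the modify step over the occurrence stream
lemma fold_eq_occ (patients : List (String × List String)) (gene_name : List String) :
    ((PySem.Dict.ofList patients).items.foldl
      (fun d pr =>
        pr.2.foldl (fun d gene =>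
          if gene ∈ gene_name then
            if d.contains gene then d.modify gene [] (fun l => l ++ [pr.1])
            else d.insert gene [pr.1]
          else d) d)
      (PySem.Dict.empty))
    = (pvOcc (PySem.Dict.ofList patients).items gene_name).foldl
        (fun d p => d.modify p.1 [] (fun l => l ++ [p.2])) PySem.Dict.empty := by
  rw [pvOcc, List.foldl_flatMap]
  apply PySem.List.foldl_congr_mem
  intro d pr _
  rw [PySem.List.foldl_ite_eq_foldl_filter, List.foldl_map]
  apply PySem.List.foldl_congr_mem
  intro d g _
  exact step_eq_modify d g pr.1

theorem random_getGene_spec : Claim_equal_random_getGene := by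
  intro patients gene_name _
  unfold Spec_random_getGene random_getGene random_getGene_alt
  rw [fold_eq_occ]
  set ps := (PySem.Dict.ofList patients).items with hps
  have hnodup : ((pvOcc ps gene_name).foldl
      (fun d p => d.modify p.1 [] (fun l => l ++ [p.2])) PySem.Dict.empty).keys.Nodup :=
    PySem.Dict.nodup_keys_foldl_modify_key (pvOcc ps gene_name) Prod.fst []
      (fun _ p => (fun l => l ++ [p.2])) PySem.Dict.empty (by simp)
  rw [PySem.Dict.items_eq_map_keys _ hnodup []]
  have hkeys : ((pvOcc ps gene_name).foldl
      (fun d p => d.modify p.1 [] (fun l => l ++ [p.2])) PySem.Dict.empty).keys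
      = PySem.List.dedup (ps.flatMap (fun pr => pr.2.filter (fun g => decide (g ∈ gene_name)))) := by
    rw [PySem.Dict.keys_foldl_modify_key (pvOcc ps gene_name) Prod.fst []
      (fun _ p => (fun l => l ++ [p.2])) PySem.Dict.empty]
    simp [PySem.List.dedup, pvOcc, List.map_flatMap, Function.comp_def,
      PySem.Set.update_nil_left]
  rw [hkeys]
  apply List.map_congr_left
  intro g hg
  have hgname : g ∈ gene_name := by
    simp only [PySem.List.dedup, PySem.Set.mem_ofList, List.mem_flatMap, List.mem_filter,
      decide_eq_true_eq] at hg
    obtain ⟨pr, -, -, hgf⟩ := hg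
    exact hgf
  congr 1
  rw [PySem.Dict.getD_foldl_modify_append, PySem.Dict.getD_empty]
  simp only [pvOcc, List.filter_flatMap, List.map_flatMap, List.nil_append]
  apply List.flatMap_congr
  intro pr _
  rw [List.filter_map, List.map_map, List.filter_filter]
  have hflt : ∀ x ∈ pr.2,
      (((fun p => p.1 == g) ∘ fun g' => (g', pr.1)) x && decide (x ∈ gene_name))
        = (x == g) := by
    intro x _
    by_cases hx : x = g
    · subst hx; simp [hgname]
    · simp [hx]
  rw [List.filter_congr hflt]
  simp [Function.comp_def]
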